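-- pv_equiv track=rewrite | github.com/pypi-data/pypi-mirror-234 | packages/climex/climex-0.5.3-py3-none-any.whl/climex/normal.py | _group_consecutive_numbers
-- ===== SOURCE A (Python) =====
-- missing_consecutive_days_max = 5
--
-- def _group_consecutive_numbers(numbers):
--
--     groups = [[numbers[0]]]
--     for number in numbers[1:]:
--         if number == groups[-1][-1] + 1:
--             groups[-1].append(number)
--         else:
--             groups.append([number])
--
--     test = True
--     for group in groups:
--         if len(group) >= missing_consecutive_days_max:
--             test = False
--
--     return test
-- ===== SOURCE B (Python) =====
-- missing_consecutive_days_max = 5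
--
-- def _group_consecutive_numbers(numbers):
--     prev = numbers[0]
--     run_len = 1
--     for number in numbers[1:]:
--         run_len = run_len + 1 if number == prev + 1 else 1
--         if run_len >= missing_consecutive_days_max:
--             return False
--         prev = number
--     return True
-- ===== Notes on version B (the rewrite author's own statement) =====
-- stated objective: simpler
-- what changed: B replaces A's two passes (building a list-of-lists of consecutive runs, then scanning their lengths) with a single pass keeping only a scalar run counter and the previous element, with an early return once a run reaches 5.
-- outside the precondition, e.g. on _group_consecutive_numbers([]): A raises IndexError, B raises IndexError
import Mathlib
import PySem

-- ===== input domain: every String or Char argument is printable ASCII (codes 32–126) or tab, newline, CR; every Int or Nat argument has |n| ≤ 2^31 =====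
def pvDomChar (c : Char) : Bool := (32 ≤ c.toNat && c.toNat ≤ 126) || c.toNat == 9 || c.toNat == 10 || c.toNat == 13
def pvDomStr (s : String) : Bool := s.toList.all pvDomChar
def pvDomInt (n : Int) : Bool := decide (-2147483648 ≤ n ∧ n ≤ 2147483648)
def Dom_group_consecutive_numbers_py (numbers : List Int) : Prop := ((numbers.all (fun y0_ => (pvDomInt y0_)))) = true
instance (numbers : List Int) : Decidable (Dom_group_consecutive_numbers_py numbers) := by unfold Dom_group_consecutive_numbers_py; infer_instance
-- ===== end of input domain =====

-- B keeps a scalar run counter in one pass (with early exit) instead of A's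
-- list-of-lists grouping followed by a second length-checking pass; objective: simpler.

-- ===== PORT A =====
def missing_consecutive_days_max : Int := 5

-- the grouping loop: for number in numbers[1:], extend or start a group
def pyGroupsLoop (groups : List (List Int)) (rest : List Int) : List (List Int) :=
  match rest with
  | [] => groups
  | n :: rest =>
    if n == (groups.getLast!).getLast! + 1 then
      pyGroupsLoop (groups.dropLast ++ [groups.getLast! ++ [n]]) rest
    else
      pyGroupsLoop (groups ++ [[n]]) rest

def group_consecutive_numbers_py (numbers : List Int) : Bool :=
  match numbers with
  | [] => false     -- Python raises IndexError here; excluded by Pre_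
  | n0 :: rest =>
    let groups := pyGroupsLoop [[n0]] rest
    groups.foldl (fun test group =>
      if missing_consecutive_days_max ≤ (group.length : Int) then false else test) true

-- ===== PORT B =====
def altLoop (prev : Int) (runLen : Int) (rest : List Int) : Bool :=
  match rest with
  | [] => true
  | n :: rest =>
    let r := if n == prev + 1 then runLen + 1 else 1
    if missing_consecutive_days_max ≤ r then false else altLoop n r rest

def group_consecutive_numbers_py_alt (numbers : List Int) : Bool :=
  match numbers with
  | [] => true      -- Python raises IndexError here; excluded by Pre_
  | n0 :: rest => altLoop n0 1 rest

-- ===== PRECONDITION & SPEC =====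
-- Pre_ excludes only the empty list, on which both Pythons raise IndexError (numbers[0]).
def Pre_group_consecutive_numbers_py (numbers : List Int) : Prop := numbers ≠ []
instance (numbers : List Int) : Decidable (Pre_group_consecutive_numbers_py numbers) := by unfold Pre_group_consecutive_numbers_py; infer_instance
def pvWitness_group_consecutive_numbers_py : List Int := [1, 2]

def Spec_group_consecutive_numbers_py (numbers : List Int) (out : Bool) : Prop := out = group_consecutive_numbers_py_alt numbers
instance (numbers : List Int) (out : Bool) : Decidable (Spec_group_consecutive_numbers_py numbers out) := by unfold Spec_group_consecutive_numbers_py; infer_instance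

-- ===== CLAIM (what is proved, stated in full; the proofs are below) =====
def Claim_equal_group_consecutive_numbers_py : Prop := ∀ (numbers : List Int), Dom_group_consecutive_numbers_py numbers → Pre_group_consecutive_numbers_py numbers → Spec_group_consecutive_numbers_py numbers (group_consecutive_numbers_py numbers)

-- ===== LEMMAS AND PROOFS =====

-- A's second pass is an 'all groups shorter than 5' check
theorem foldl_check (gs : List (List Int)) (b : Bool) :
    gs.foldl (fun test group =>
      if missing_consecutive_days_max ≤ (group.length : Int) then false else test) b
    = (b && gs.all (fun g => decide ((g.length : Int) < missing_consecutive_days_max))) := by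
  induction gs generalizing b with
  | nil => simp
  | cons g gs ih =>
    simp only [List.foldl_cons, List.all_cons, ih]
    split_ifs with h
    · simp [not_lt.mpr h]
    · simp [not_le.mp h]

theorem getLast!_concat' {α : Type} [Inhabited α] (gs : List α) (g : α) : (gs ++ [g]).getLast! = g := by
  simp

-- once some group has reached length 5, A's final answer is false
theorem groups_false (rest : List Int) (gs : List (List Int)) (g : List Int)
    (hg : (∃ h ∈ gs, missing_consecutive_days_max ≤ ((h.length : Int)))
          ∨ missing_consecutive_days_max ≤ ((g.length : Int))) :
    ((pyGroupsLoop (gs ++ [g]) rest).all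
      (fun h => decide ((h.length : Int) < missing_consecutive_days_max))) = false := by
  induction rest generalizing gs g with
  | nil =>
    simp only [pyGroupsLoop]
    rcases hg with ⟨h, hm, hh⟩ | hg
    · simp only [List.all_eq_false]
      exact ⟨h, by simp [hm], by simp [not_lt.mpr hh]⟩
    · simp only [List.all_eq_false]
      exact ⟨g, by simp, by simp [not_lt.mpr hg]⟩
  | cons n rest ih =>
    simp only [pyGroupsLoop, getLast!_concat', List.dropLast_concat]
    split_ifs with h
    · refine ih gs (g ++ [n]) ?_
      rcases hg with hl | hg
      · exact Or.inl hl
      · refine Or.inr ?_; simp at hg ⊢; omega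
    · refine ih (gs ++ [g]) [n] (Or.inl ?_)
      rcases hg with ⟨h', hm, hh⟩ | hg
      · exact ⟨h', by simp [hm], hh⟩
      · exact ⟨g, by simp, hg⟩

-- main invariant: A's remaining grouping (last group g ++ [prev], all finished groups short)
-- followed by the length check equals B's scalar loop
theorem main_inv (rest : List Int) (gs : List (List Int)) (g : List Int) (prev : Int)
    (hgs : ∀ h ∈ gs, ((h.length : Int) < missing_consecutive_days_max))
    (hg : (((g ++ [prev]).length : Int) < missing_consecutive_days_max)) :
    ((pyGroupsLoop (gs ++ [g ++ [prev]]) rest).all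
      (fun h => decide ((h.length : Int) < missing_consecutive_days_max)))
    = altLoop prev ((g.length : Int) + 1) rest := by
  induction rest generalizing gs g prev with
  | nil =>
    simp only [pyGroupsLoop, altLoop]
    rw [List.all_eq_true]
    intro x hx
    rcases List.mem_append.mp hx with hm | hm
    · simpa using hgs x hm
    · simp only [List.mem_singleton] at hm
      subst hm
      simpa using hg
  | cons n rest ih =>
    simp only [pyGroupsLoop, altLoop, getLast!_concat', List.dropLast_concat]
    by_cases h : (n == prev + 1) = true
    · simp only [h, if_pos]
      by_cases hr : missing_consecutive_days_max ≤ (g.length : Int) + 1 + 1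
      · rw [if_pos hr]
        refine groups_false rest gs ((g ++ [prev]) ++ [n]) (Or.inr ?_)
        simp at hr ⊢; omega
      · rw [if_neg hr]
        have := ih gs (g ++ [prev]) n hgs (by simp at hr ⊢; omega)
        simpa using this
    · simp only [h, if_neg, Bool.false_eq_true, not_false_eq_true, List.append_assoc]
      have h1 : ¬ missing_consecutive_days_max ≤ (1 : Int) := by
        simp [missing_consecutive_days_max]
      rw [if_neg h1]
      have := ih (gs ++ [g ++ [prev]]) [] n
        (by intro h' hm; rcases List.mem_append.mp hm with hm | hm
            · exact hgs h' hm
            · simp at hm; subst hm; exact hg)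
        (by simp [missing_consecutive_days_max])
      simpa using this

-- ===== VERDICT (by name: the statement is the Claim_ definition above) =====
theorem group_consecutive_numbers_py_spec : Claim_equal_group_consecutive_numbers_py := by
  intro numbers _ hpre
  unfold Spec_group_consecutive_numbers_py
  match numbers with
  | [] => exact absurd rfl hpre
  | n0 :: rest =>
    simp only [group_consecutive_numbers_py, group_consecutive_numbers_py_alt, foldl_check,
      Bool.true_and]
    have := main_inv rest [] [] n0 (by simp) (by simp [missing_consecutive_days_max])
    simpa using this
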